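-- pv_equiv track=rewrite | github.com/clnsmth/soso | src/soso/strategies/spase/spase.py | name_splitter
-- ===== SOURCE A (Python) =====
-- def name_splitter(person: str) -> tuple[str, str, str]:
--     """
--     Splits the given PersonID found in the SPASE Contacts container into
--     three separate strings holding their full name, first name (and middle initial),
--     and last name.
--
--     :param person: The string found in the Contacts field as is formatted in the SPASE record.
--
--     :returns: The string containing the full name of the Contact, the string
--         containing the first name/initial of the Contact,
--         and the string containing the last name of the Contact
--     """
--     if person:
--         *_, name_str = person.partition("Person/")
--         # get rid of extra quotations
--         name_str = name_str.replace("'", "")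
--         if "." in name_str:
--             given_name, _, family_name = name_str.partition(".")
--             # if first name is also initial
--             if len(given_name) == 1:
--                 given_name += "."
--             # if person has a generational suffix
--             if (
--                 family_name.endswith(".II")
--                 or family_name.endswith(".III")
--                 or family_name.endswith(".Jr")
--                 or family_name.endswith(".Sr")
--             ):
--                 family_name, _, suffix = family_name.rpartition(".")
--                 family_name = family_name + " " + suffix
--             # if name has initial(s)
--             while "." in family_name:
--                 initial, _, family_name = family_name.partition(".")
--                 if len(initial) > 1:
--                     initial = initial[0]
--                 given_name = given_name + " " + initial + "."
--             name_str = given_name + " " + family_name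
--             name_str = name_str.replace('"', "")
--         else:
--             given_name = ""
--             family_name = ""
--     else:
--         raise ValueError(
--             "This function only takes a nonempty string as an argument. Try again."
--         )
--     return name_str, given_name, family_name
-- ===== SOURCE B (Python) =====
-- # Simpler decomposition: split the name once on '.' into tokens and read the parts
-- # off the token list (given = first token, optional generational suffix from the tail,
-- # interior tokens folded in as one-char initials), instead of A's partition/rpartition
-- # plus a destructive while-loop over the remaining string.
--
-- SUFFIXES = ("II", "III", "Jr", "Sr")
--
--
-- def name_splitter(person: str) -> tuple[str, str, str]:
--     if not person:
--         raise ValueError(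
--             "This function only takes a nonempty string as an argument. Try again."
--         )
--     i = person.find("Person/")
--     tail = "" if i == -1 else person[i + 7:]
--     s = tail.replace("'", "")
--     if "." not in s:
--         return s, "", ""
--     tokens = s.split(".")
--     t0, rest = tokens[0], tokens[1:]
--     given = t0 + "." if len(t0) == 1 else t0
--     if len(rest) >= 2 and rest[-1] in SUFFIXES:
--         mids, family = rest[:-2], rest[-2] + " " + rest[-1]
--     else:
--         mids, family = rest[:-1], rest[-1]
--     for t in mids:
--         given += " " + t[:1] + "."
--     full = (given + " " + family).replace('"', "")
--     return full, given, family
-- ===== Notes on version B (the rewrite author's own statement) =====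
-- stated objective: simpler
-- what changed: B splits the quote-stripped name once on '.' into a token list and reads the result off that list (first token = given name, optional generational suffix taken from the tail tokens, interior tokens folded in as one-char initials), replacing A's partition/endswith/rpartition chain and its destructive while-loop over the remaining string.
import Mathlib
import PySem

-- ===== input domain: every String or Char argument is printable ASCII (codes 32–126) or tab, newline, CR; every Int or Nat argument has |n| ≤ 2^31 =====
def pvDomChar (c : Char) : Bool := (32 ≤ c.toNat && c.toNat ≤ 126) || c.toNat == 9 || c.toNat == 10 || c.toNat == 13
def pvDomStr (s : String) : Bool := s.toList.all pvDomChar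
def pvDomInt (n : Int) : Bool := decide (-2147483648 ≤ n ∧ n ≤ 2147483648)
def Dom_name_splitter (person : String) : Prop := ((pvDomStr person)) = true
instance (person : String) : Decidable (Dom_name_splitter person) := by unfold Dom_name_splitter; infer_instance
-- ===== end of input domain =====

-- B re-implements A by one split('.') over a token list instead of A's partition/rpartition
-- plus a destructive while-loop; same return values (objective: simpler); A raises ValueError
-- on "" (excluded by Pre_), where B raises the same ValueError.

-- ===== PORT A =====

/-- Python `s.partition(c)` for a single-char separator, as an Option:
`some (before, after)` when `c` occurs in `s`, `none` when it does not
(Python then returns `(s, '', '')`). Exact. -/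
def pvPart1 (c : Char) : List Char → Option (List Char × List Char)
  | [] => none
  | x :: xs => if x = c then some ([], xs) else (pvPart1 c xs).map (fun pq => (x :: pq.1, pq.2))

/-- The `after` part of a found partition is strictly shorter (for `pvAWhile`'s termination). -/
lemma pvPart1_length {c : Char} : ∀ {s : List Char} {p q : List Char},
    pvPart1 c s = some (p, q) → q.length < s.length := by
  intro s
  induction s with
  | nil => intro p q h; simp [pvPart1] at h
  | cons x xs ih =>
    intro p q h
    simp only [pvPart1] at h
    split at h
    · cases h; simp
    · cases hpq : pvPart1 c xs with
      | none => rw [hpq] at h; simp at h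
      | some ab =>
        rw [hpq] at h
        simp at h
        have := ih (p := ab.1) (q := ab.2) (by rw [hpq])
        rw [← h.2]
        simp
        omega

/-- Python `s.rpartition(c)` (split at the last occurrence) as partition of the reverse. Exact. -/
def pvRPart1 (c : Char) (s : List Char) : Option (List Char × List Char) :=
  (pvPart1 c s.reverse).map (fun pq => (pq.2.reverse, pq.1.reverse))

/-- A's generational-suffix test on `family_name`. -/
def pvSuffA (f : List Char) : Bool :=
  PySem.Chars.endswith f ".II".toList || PySem.Chars.endswith f ".III".toList ||
    PySem.Chars.endswith f ".Jr".toList || PySem.Chars.endswith f ".Sr".toList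

/-- A's `while "." in family_name:` loop over `(given_name, family_name)`. -/
def pvAWhile (g f : List Char) : List Char × List Char :=
  match h : pvPart1 '.' f with
  | none => (g, f)
  | some inif =>
    -- initial = initial[0] (a one-char string): take 1 is exact under the length guard
    let ini := if 1 < inif.1.length then inif.1.take 1 else inif.1
    pvAWhile (g ++ ' ' :: (ini ++ ['.'])) inif.2
termination_by f.length
decreasing_by exact pvPart1_length h

/-- A's body on the character list of a nonempty `person`. -/
def pvACore (s : List Char) : List Char × List Char × List Char :=
  -- `*_, name_str = person.partition("Person/")`: the part after the FIRST occurrence, '' if absent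
  let i := PySem.Chars.find s "Person/".toList
  let name0 := if i = -1 then [] else s.drop (i.toNat + 7)
  let name1 := PySem.Chars.replace name0 ['\''] []
  match pvPart1 '.' name1 with          -- `if "." in name_str:` + `partition(".")`
  | none => (name1, [], [])
  | some gf =>
    let g0 := if gf.1.length = 1 then gf.1 ++ ['.'] else gf.1
    let f0 := if pvSuffA gf.2 then
        match pvRPart1 '.' gf.2 with
        | some fs => fs.1 ++ ' ' :: fs.2
        | none => ' ' :: gf.2           -- rpartition with no '.' gives ('', '', f); unreachable under the guard
      else gf.2
    let r := pvAWhile g0 f0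
    (PySem.Chars.replace (r.1 ++ ' ' :: r.2) ['"'] [], r.1, r.2)

def name_splitter (person : String) : String × String × String :=
  if person = "" then ("", "", "")      -- Python raises ValueError here; excluded by Pre_
  else
    let r := pvACore person.toList
    (String.ofList r.1, String.ofList r.2.1, String.ofList r.2.2)

-- ===== PORT B =====

def pvSuffixes : List (List Char) := ["II".toList, "III".toList, "Jr".toList, "Sr".toList]

/-- B's per-interior-token step: `given += " " + t[:1] + "."`. -/
def pvStep (g t : List Char) : List Char := g ++ ' ' :: (t.take 1 ++ ['.'])

/-- B's body on the character list of a nonempty `person`. -/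
def pvBCore (s : List Char) : List Char × List Char × List Char :=
  let i := PySem.Chars.find s "Person/".toList
  let tl := if i = -1 then [] else s.drop (i.toNat + 7)
  let s1 := PySem.Chars.replace tl ['\''] []
  if PySem.Chars.isIn ['.'] s1 then
    let tokens := List.splitOn '.' s1   -- Python `s.split(".")`: List.splitOn is exact for a 1-char separator
    let t0 := tokens.headD []           -- tokens[0]; split never returns [] so headD/getLastD defaults are unreachable
    let rest := tokens.tail
    let g0 := if t0.length = 1 then t0 ++ ['.'] else t0
    let mf : List (List Char) × List Char :=
      if 2 ≤ rest.length ∧ rest.getLastD [] ∈ pvSuffixes then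
        (rest.dropLast.dropLast, rest.dropLast.getLastD [] ++ ' ' :: rest.getLastD [])
      else (rest.dropLast, rest.getLastD [])
    let given := mf.1.foldl pvStep g0
    (PySem.Chars.replace (given ++ ' ' :: mf.2) ['"'] [], given, mf.2)
  else (s1, [], [])

def name_splitter_alt (person : String) : String × String × String :=
  if person = "" then ("", "", "")      -- B raises the same ValueError here; excluded by Pre_
  else
    let r := pvBCore person.toList
    (String.ofList r.1, String.ofList r.2.1, String.ofList r.2.2)

-- ===== PRECONDITION & SPEC =====
-- Pre_ excludes exactly the empty string, on which A (and B) raise ValueError.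
def Pre_name_splitter (person : String) : Prop := person ≠ ""
instance (person : String) : Decidable (Pre_name_splitter person) := by unfold Pre_name_splitter; infer_instance
def pvWitness_name_splitter : String := "Person/John.B.Doe.Jr"

def Spec_name_splitter (person : String) (out : String × String × String) : Prop := out = name_splitter_alt person
instance (person : String) (out : String × String × String) : Decidable (Spec_name_splitter person out) := by unfold Spec_name_splitter; infer_instance

-- ===== CLAIM (what is proved, stated in full; the proofs are below) =====
def Claim_equal_name_splitter : Prop := ∀ (person : String), Dom_name_splitter person → Pre_name_splitter person → Spec_name_splitter person (name_splitter person)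

-- ===== LEMMAS AND PROOFS =====

lemma pvPart1_eq_none {c : Char} {s : List Char} (h : c ∉ s) : pvPart1 c s = none := by
  induction s with
  | nil => rfl
  | cons x xs ih =>
    simp at h
    have hx : ¬ x = c := fun e => h.1 e.symm
    simp [pvPart1, hx, ih h.2]

lemma pvPart1_append {c : Char} {t r : List Char} (h : c ∉ t) :
    pvPart1 c (t ++ c :: r) = some (t, r) := by
  induction t with
  | nil => simp [pvPart1]
  | cons x xs ih =>
    simp at h
    have hx : ¬ x = c := fun e => h.1 e.symm
    simp [pvPart1, hx, ih h.2]

/-- Single-separator join of a token list ( `['.'].intercalate` in recursive form). -/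
def pvJ : List (List Char) → List Char
  | [] => []
  | [t] => t
  | t :: u :: ts => t ++ '.' :: pvJ (u :: ts)

lemma pvJ_eq_intercalate : ∀ ts : List (List Char), List.intercalate ['.'] ts = pvJ ts
  | [] => by simp [pvJ, List.intercalate]
  | [t] => by simp [pvJ, List.intercalate]
  | t :: u :: ts => by
    have := pvJ_eq_intercalate (u :: ts)
    simp [List.intercalate] at this ⊢
    simp [pvJ, ← this]

lemma pvJ_cons {t : List Char} {ts : List (List Char)} (h : ts ≠ []) :
    pvJ (t :: ts) = t ++ '.' :: pvJ ts := by
  cases ts with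
  | nil => exact absurd rfl h
  | cons u us => rfl

lemma pvJ_concat {X : List (List Char)} {b : List Char} (h : X ≠ []) :
    pvJ (X ++ [b]) = pvJ X ++ '.' :: b := by
  induction X with
  | nil => exact absurd rfl h
  | cons x xs ih =>
    cases xs with
    | nil => simp [pvJ]
    | cons u us =>
      rw [List.cons_append, pvJ_cons (by simp), pvJ_cons (by simp), ih (by simp)]
      simp

lemma pv_getLastD_irrel {α : Type} {l : List α} (h : l ≠ []) (d e : α) :
    l.getLastD d = l.getLastD e := by
  rw [List.getLastD_eq_getLast?, List.getLastD_eq_getLast?, List.getLast?_eq_some_getLast h]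
  rfl

lemma pv_getLastD_mem {α : Type} {l : List α} (h : l ≠ []) (d : α) : l.getLastD d ∈ l := by
  rw [List.getLastD_eq_getLast?, List.getLast?_eq_some_getLast h]
  exact List.getLast_mem h

lemma pv_concat_getLastD {α : Type} {l : List (List α)} (h : l ≠ []) :
    l.dropLast ++ [l.getLastD []] = l := by
  rw [List.getLastD_eq_getLast?, List.getLast?_eq_some_getLast h]
  exact List.dropLast_concat_getLast h

lemma pvJ_absorb : ∀ {X : List (List Char)}, X ≠ [] → ∀ (s : List Char),
    pvJ X ++ s = pvJ (X.dropLast ++ [X.getLastD [] ++ s]) := by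
  intro X
  induction X with
  | nil => intro h; exact absurd rfl h
  | cons x xs ih =>
    intro _ s
    cases xs with
    | nil => simp [pvJ, List.getLastD]
    | cons u us =>
      calc pvJ (x :: u :: us) ++ s
          = x ++ '.' :: (pvJ (u :: us) ++ s) := by
            rw [pvJ_cons (t := x) (ts := u :: us) (by simp)]; simp
        _ = x ++ '.' :: pvJ ((u :: us).dropLast ++ [(u :: us).getLastD [] ++ s]) := by
            rw [ih (by simp) s]
        _ = pvJ (x :: ((u :: us).dropLast ++ [(u :: us).getLastD [] ++ s])) :=
            (pvJ_cons (by simp)).symm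
        _ = pvJ ((x :: u :: us).dropLast ++ [(x :: u :: us).getLastD [] ++ s]) := by
            conv_rhs => rw [List.dropLast_cons_of_ne_nil (l := u :: us) (by simp),
              List.cons_append, List.getLastD_cons,
              pv_getLastD_irrel (l := u :: us) (by simp) x []]

/-- Tokens produced by splitOnP never satisfy the predicate. -/
lemma pv_splitOnP_free {p : Char → Bool} : ∀ {xs : List Char} {t : List Char},
    t ∈ xs.splitOnP p → ∀ a ∈ t, ¬ p a := by
  intro xs
  induction xs with
  | nil =>
    intro t ht
    simp [List.splitOnP_nil] at ht
    simp [ht]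
  | cons x xs ih =>
    intro t ht
    rw [List.splitOnP_cons] at ht
    split at ht
    · rcases List.mem_cons.mp ht with h1 | h1
      · simp [h1]
      · exact ih h1
    · rename_i hpx
      obtain ⟨h, rest, hrest⟩ : ∃ h rest, xs.splitOnP p = h :: rest := by
        cases hx : xs.splitOnP p with
        | nil => exact absurd hx (List.splitOnP_ne_nil p xs)
        | cons h rest => exact ⟨h, rest, rfl⟩
      rw [hrest] at ht
      simp only [List.modifyHead] at ht
      rcases List.mem_cons.mp ht with h1 | h1
      · subst h1
        intro a ha
        rcases List.mem_cons.mp ha with h2 | h2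
        · rw [h2]; simp [hpx]
        · exact ih (by rw [hrest]; exact List.mem_cons_self) a h2
      · exact ih (by rw [hrest]; exact List.mem_cons_of_mem _ h1)

/-- Tokens produced by splitOn never contain the separator. -/
lemma pv_splitOn_free {xs : List Char} {t : List Char} (h : t ∈ List.splitOn '.' xs) : '.' ∉ t := by
  intro hmem
  have := pv_splitOnP_free (p := (· == '.')) h '.' hmem
  simp at this

lemma pv_splitOn_join (xs : List Char) : pvJ (List.splitOn '.' xs) = xs := by
  rw [← pvJ_eq_intercalate]; exact List.intercalate_splitOn xs '.'

lemma pv_splitOn_len {xs : List Char} (h : '.' ∈ xs) : 2 ≤ (List.splitOn '.' xs).length := by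
  cases hx : List.splitOn '.' xs with
  | nil => exact absurd hx (List.splitOnP_ne_nil _ xs)
  | cons t rest =>
    cases rest with
    | cons u us => simp
    | nil =>
      exfalso
      have hj := pv_splitOn_join xs
      rw [hx] at hj
      simp [pvJ] at hj
      exact pv_splitOn_free (by rw [hx]; exact List.mem_cons_self) (hj ▸ h)

/-- `w ++ ['.']` is a prefix of `t ++ '.' :: r` for dot-free `w`, `t` exactly when `w = t`. -/
lemma pv_prefix_dot : ∀ {w t r : List Char}, '.' ∉ w → '.' ∉ t →
    ((w ++ ['.'] <+: t ++ '.' :: r) ↔ w = t) := by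
  intro w
  induction w with
  | nil =>
    intro t r _ ht
    cases t with
    | nil => simp
    | cons y ys =>
      simp only [List.nil_append, List.cons_append]
      constructor
      · intro hp
        exfalso
        have h1 := (List.cons_prefix_cons.mp hp).1
        simp at ht
        exact ht.1 h1
      · intro hp; exact absurd hp (by simp)
  | cons a as ih =>
    intro t r hw ht
    cases t with
    | nil =>
      simp only [List.cons_append, List.nil_append]
      constructor
      · intro hp
        exfalso
        have h1 := (List.cons_prefix_cons.mp hp).1
        simp at hw
        exact hw.1 h1.symm
      · intro hp; exact absurd hp (by simp)
    | cons y ys =>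
      simp only [List.cons_append, List.cons_prefix_cons]
      simp at hw ht
      rw [ih hw.2 ht.2]
      exact (List.cons_eq_cons).symm

/-- Endswith-a-dot-suffix on a join of dot-free tokens reads off the last token. -/
lemma pv_endswith_join {ts : List (List Char)} {w : List Char}
    (hts : ts ≠ []) (hfree : ∀ t ∈ ts, '.' ∉ t) (hw : '.' ∉ w) :
    (('.' :: w) <:+ pvJ ts) ↔ (2 ≤ ts.length ∧ ts.getLastD [] = w) := by
  rcases List.eq_nil_or_concat ts with rfl | ⟨X, b, rfl⟩
  · exact absurd rfl hts
  · simp only [List.concat_eq_append] at hfree ⊢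
    have hb : '.' ∉ b := hfree b (by simp)
    rcases eq_or_ne X [] with rfl | hXne
    · simp only [List.nil_append]
      constructor
      · intro hsuf
        exact absurd (hsuf.sublist.subset (List.mem_cons_self)) (by simpa [pvJ] using hb)
      · rintro ⟨h2, _⟩
        simp only [List.length_singleton] at h2
        omega
    · rw [pvJ_concat hXne, ← List.reverse_prefix]
      have e1 : ('.' :: w).reverse = w.reverse ++ ['.'] := by simp
      have e2 : (pvJ X ++ '.' :: b).reverse = b.reverse ++ '.' :: (pvJ X).reverse := by simp
      rw [e1, e2, pv_prefix_dot (by simpa using hw) (by simpa using hb)]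
      have hlen : 2 ≤ (X ++ [b]).length := by
        have := List.length_pos_iff.mpr hXne
        simp
        omega
      rw [List.getLastD_concat]
      constructor
      · intro h
        exact ⟨hlen, (List.reverse_inj.mp h).symm⟩
      · rintro ⟨_, hlast⟩
        rw [hlast]

/-- `initial[0]` under A's guard is `take 1`. -/
lemma pv_ini_take (t : List Char) : (if 1 < t.length then t.take 1 else t) = t.take 1 := by
  match t with
  | [] => simp
  | [a] => simp
  | a :: b :: r => simp

/-- A's while-loop on a join of dot-free tokens = fold over the interior tokens. -/
lemma pv_while_join : ∀ (ts : List (List Char)), ts ≠ [] → (∀ t ∈ ts, '.' ∉ t) → ∀ g,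
    pvAWhile g (pvJ ts) = (ts.dropLast.foldl pvStep g, ts.getLastD []) := by
  intro ts
  induction ts with
  | nil => intro h; exact absurd rfl h
  | cons t ts ih =>
    intro _ hfree g
    cases ts with
    | nil =>
      rw [pvAWhile]
      split
      · simp [pvJ]
      · rename_i inif h
        simp only [pvJ] at h
        rw [pvPart1_eq_none (hfree t (by simp))] at h
        cases h
    | cons u us =>
      rw [pvJ_cons (t := t) (ts := u :: us) (by simp), pvAWhile]
      split
      · rename_i h
        rw [pvPart1_append (hfree t (by simp))] at h
        cases h
      · rename_i inif h
        rw [pvPart1_append (hfree t (by simp))] at h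
        obtain rfl : inif = (t, pvJ (u :: us)) := by injection h with h'; exact h'.symm
        show pvAWhile (g ++ ' ' :: ((if 1 < t.length then t.take 1 else t) ++ ['.'])) (pvJ (u :: us))
            = ((t :: u :: us).dropLast.foldl pvStep g, (t :: u :: us).getLastD [])
        rw [pv_ini_take, ih (by simp) (fun x hx => hfree x (List.mem_cons_of_mem _ hx))]
        conv_rhs => rw [List.dropLast_cons_of_ne_nil (l := u :: us) (by simp),
          List.foldl_cons, List.getLastD_cons,
          pv_getLastD_irrel (l := u :: us) (by simp) t []]
        rfl

set_option maxHeartbeats 1000000 in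
/-- The two cores agree on every character list. -/
lemma pvCore_eq (s : List Char) : pvACore s = pvBCore s := by
  simp only [pvACore, pvBCore]
  set s1 := PySem.Chars.replace
      (if PySem.Chars.find s "Person/".toList = -1 then ([] : List Char)
        else s.drop ((PySem.Chars.find s "Person/".toList).toNat + 7)) ['\''] [] with hs1
  by_cases hdot : '.' ∈ s1
  · -- the dot branch: relate A's partition chain to B's token list
    cases hts : List.splitOn '.' s1 with
    | nil => exact absurd hts (List.splitOnP_ne_nil _ s1)
    | cons t0 rest =>
      have hlen := pv_splitOn_len hdot
      rw [hts] at hlen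
      have hrne : rest ≠ [] := by
        cases rest with
        | nil => simp at hlen
        | cons a l => simp
      have hj : pvJ (t0 :: rest) = s1 := by rw [← hts]; exact pv_splitOn_join s1
      have hfree : ∀ t ∈ t0 :: rest, '.' ∉ t := fun t ht => pv_splitOn_free (hts ▸ ht)
      have hfreer : ∀ t ∈ rest, '.' ∉ t := fun t ht => hfree t (List.mem_cons_of_mem _ ht)
      have hpart : pvPart1 '.' s1 = some (t0, pvJ rest) := by
        rw [← hj, pvJ_cons hrne]
        exact pvPart1_append (hfree t0 (by simp))
      have hisin : PySem.Chars.isIn ['.'] s1 = true :=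
        (PySem.Chars.isIn_iff_infix _ _).mpr ((List.singleton_infix_iff _ _).mpr hdot)
      rw [hpart]
      simp only [hisin, if_true, hts, List.headD_cons, List.tail_cons]
      -- the generational-suffix test, read off the token list
      have h1 := pv_endswith_join (ts := rest) (w := "II".toList) hrne hfreer (by decide)
      have h2 := pv_endswith_join (ts := rest) (w := "III".toList) hrne hfreer (by decide)
      have h3 := pv_endswith_join (ts := rest) (w := "Jr".toList) hrne hfreer (by decide)
      have h4 := pv_endswith_join (ts := rest) (w := "Sr".toList) hrne hfreer (by decide)
      have hsuffiff : pvSuffA (pvJ rest) = true ↔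
          (2 ≤ rest.length ∧ rest.getLastD [] ∈ pvSuffixes) := by
        unfold pvSuffA
        simp only [Bool.or_eq_true, PySem.Chars.endswith_iff]
        rw [show (".II".toList) = '.' :: "II".toList from rfl,
          show (".III".toList) = '.' :: "III".toList from rfl,
          show (".Jr".toList) = '.' :: "Jr".toList from rfl,
          show (".Sr".toList) = '.' :: "Sr".toList from rfl]
        rw [h1, h2, h3, h4]
        simp only [pvSuffixes, List.mem_cons, List.not_mem_nil, or_false]
        constructor
        · rintro (((⟨h, h'⟩ | ⟨h, h'⟩) | ⟨h, h'⟩) | ⟨h, h'⟩)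
          · exact ⟨h, Or.inl h'⟩
          · exact ⟨h, Or.inr (Or.inl h')⟩
          · exact ⟨h, Or.inr (Or.inr (Or.inl h'))⟩
          · exact ⟨h, Or.inr (Or.inr (Or.inr h'))⟩
        · rintro ⟨h, h' | h' | h' | h'⟩
          · exact Or.inl (Or.inl (Or.inl ⟨h, h'⟩))
          · exact Or.inl (Or.inl (Or.inr ⟨h, h'⟩))
          · exact Or.inl (Or.inr ⟨h, h'⟩)
          · exact Or.inr ⟨h, h'⟩
      by_cases hc : 2 ≤ rest.length ∧ rest.getLastD [] ∈ pvSuffixes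
      · have hsA : pvSuffA (pvJ rest) = true := hsuffiff.mpr hc
        rw [if_pos hsA, if_pos hc]
        have hco := pv_concat_getLastD (l := rest) hrne
        have hinitne : rest.dropLast ≠ [] := by
          intro hnil
          have hl := congrArg List.length hnil
          rw [List.length_dropLast] at hl
          simp at hl
          omega
        have hwfree : '.' ∉ rest.getLastD [] := hfreer _ (pv_getLastD_mem hrne [])
        have hjr : pvJ rest = pvJ rest.dropLast ++ '.' :: rest.getLastD [] := by
          have := pvJ_concat (X := rest.dropLast) (b := rest.getLastD []) hinitne
          rw [hco] at this
          exact this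
        have hrpart : pvRPart1 '.' (pvJ rest) = some (pvJ rest.dropLast, rest.getLastD []) := by
          unfold pvRPart1
          rw [hjr]
          have : (pvJ rest.dropLast ++ '.' :: rest.getLastD []).reverse
              = (rest.getLastD []).reverse ++ '.' :: (pvJ rest.dropLast).reverse := by simp
          rw [this, pvPart1_append (by simpa using hwfree)]
          simp
        simp only [hrpart]
        have habs := pvJ_absorb hinitne (' ' :: rest.getLastD [])
        have hts' : (rest.dropLast.dropLast
            ++ [rest.dropLast.getLastD [] ++ ' ' :: rest.getLastD []]) ≠ [] := by simp
        have hfree' : ∀ t ∈ rest.dropLast.dropLast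
            ++ [rest.dropLast.getLastD [] ++ ' ' :: rest.getLastD []], '.' ∉ t := by
          intro t ht
          rcases List.mem_append.mp ht with h | h
          · exact hfreer t ((List.dropLast_sublist _).subset ((List.dropLast_sublist _).subset h))
          · have ht' : t = rest.dropLast.getLastD [] ++ ' ' :: rest.getLastD [] := by
              simpa using h
            rw [ht']
            intro hmem
            rcases List.mem_append.mp hmem with h' | h'
            · exact hfreer _ ((List.dropLast_sublist _).subset (pv_getLastD_mem hinitne [])) h'
            · rcases List.mem_cons.mp h' with h'' | h''
              · exact absurd h'' (by decide)
              · exact hwfree h''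
        rw [habs, pv_while_join _ hts' hfree', List.dropLast_concat, List.getLastD_concat]
      · have hsA : pvSuffA (pvJ rest) = false := by
          cases hx : pvSuffA (pvJ rest)
          · rfl
          · exact absurd (hsuffiff.mp hx) hc
        have hnot : ¬ (pvSuffA (pvJ rest) = true) := by rw [hsA]; simp
        rw [if_neg hnot, if_neg hc]
        rw [pv_while_join _ hrne hfreer]
  · have hnone : pvPart1 '.' s1 = none := pvPart1_eq_none hdot
    have hisin : PySem.Chars.isIn ['.'] s1 = false := by
      rw [Bool.eq_false_iff]
      intro h
      exact hdot ((List.singleton_infix_iff _ _).mp ((PySem.Chars.isIn_iff_infix _ _).mp h))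
    rw [hnone]
    simp [hisin]

-- ===== VERDICT (by name: the statement is the Claim_ definition above) =====
theorem name_splitter_spec : Claim_equal_name_splitter := by
  intro person _ hpre
  unfold Spec_name_splitter name_splitter name_splitter_alt
  rw [pvCore_eq]
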